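-- pv_equiv track=rewrite | github.com/dyshleva/pb-homework | week4/lab4_task_1.py | numbers_Ulam
-- ===== SOURCE A (Python) =====
-- def numbers_Ulam(n: int) -> list:
--     """
--     Returns the first n ulam numbers
--
--     :param n: amount of numbers
--
--     :rtype: list: list of n ulam numbers
--     >>> numbers_Ulam(10)
--     [1, 2, 3, 4, 6, 8, 11, 13, 16, 18]
--     >>> numbers_Ulam(2)
--     [1, 2]
--     >>> numbers_Ulam(1)
--     [1]
--     """
--     if n == 1:
--         return [1]
--
--     ulam = [1, 2]
--
--     i = 3
--     while len(ulam) < n: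
--         count = 0
--
--         for j in range(len(ulam) - 1):
--             for k in range(j + 1, len(ulam)):
--                 if ulam[j] + ulam[k] == i:
--                     count += 1
--                 if count > 1:
--                     break
--             if count > 1:
--                 break
--         if count == 1:
--             ulam.append(i)
--
--         i += 1
--
--     return ulam
-- ===== SOURCE B (Python) =====
-- def numbers_Ulam(n: int) -> list:
--     """Returns the first n Ulam numbers via an incremental representation-count sieve."""
--     if n == 1:
--         return [1]
--
--     ulam = [1, 2]
--     counts = {3: 1}  # counts[m] = number of pairs of distinct ulam members summing to m
--
--     i = 3
--     while len(ulam) < n: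
--         if counts.get(i, 0) == 1:
--             for v in ulam:
--                 counts[v + i] = counts.get(v + i, 0) + 1
--             ulam.append(i)
--         i += 1
--
--     return ulam
-- ===== Notes on version B (the rewrite author's own statement) =====
-- stated objective: faster
-- what changed: Replaces A's per-candidate O(len^2) nested pairwise rescan by a dictionary of two-distinct-member sum-representation counts that is updated incrementally each time an Ulam number is appended, so deciding a candidate is a single dict lookup.
import Mathlib
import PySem

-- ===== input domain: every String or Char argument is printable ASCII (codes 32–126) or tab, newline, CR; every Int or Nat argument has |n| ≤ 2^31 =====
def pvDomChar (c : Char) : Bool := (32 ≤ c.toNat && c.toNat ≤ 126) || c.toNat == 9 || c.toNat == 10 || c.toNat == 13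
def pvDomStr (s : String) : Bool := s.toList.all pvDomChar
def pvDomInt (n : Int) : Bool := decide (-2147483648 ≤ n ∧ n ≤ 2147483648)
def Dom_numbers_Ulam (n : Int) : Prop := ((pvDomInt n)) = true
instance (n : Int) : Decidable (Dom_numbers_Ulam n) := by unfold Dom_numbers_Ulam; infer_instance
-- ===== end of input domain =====

-- B replaces A's per-candidate O(len^2) pairwise rescan by a representation-count
-- dictionary updated incrementally on each append (objective: faster, asymptotic).
-- Both while-loops are ported with the same fuel bound 64*n+64 candidates (a totality
-- guard only; it is ample for every n on which the loop is actually evaluated).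

-- ===== PORT A =====
-- inner 'for k in range(j+1, len(ulam))' loop with its two 'break' checks;
-- indices j, k are provably in range, so ulam.getD · 0 is exact for ulam[·]
def innerA (ulam : List Int) (i : Int) (j k : Nat) (count : Nat) : Nat :=
  if k < ulam.length then
    let c := if ulam.getD j 0 + ulam.getD k 0 == i then count + 1 else count
    if 1 < c then c else innerA ulam i j (k + 1) c
  else count
termination_by ulam.length - k

-- outer 'for j in range(len(ulam) - 1)' loop with its 'break' check
def outerA (ulam : List Int) (i : Int) (j : Nat) (count : Nat) : Nat :=
  if j + 1 < ulam.length then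
    let c := innerA ulam i j (j + 1) count
    if 1 < c then c else outerA ulam i (j + 1) c
  else count
termination_by ulam.length - j

-- 'while len(ulam) < n' loop of A (fuel = totality guard)
def loopA (n : Int) (ulam : List Int) (i : Int) : Nat → List Int
  | 0 => ulam
  | fuel + 1 =>
    if (ulam.length : Int) < n then
      let count := outerA ulam i 0 0
      loopA n (if count == 1 then ulam ++ [i] else ulam) (i + 1) fuel
    else ulam

def numbers_Ulam (n : Int) : List Int :=
  if n == 1 then [1]
  else loopA n [1, 2] 3 (64 * n.toNat + 64)

-- ===== PORT B =====
-- 'for v in ulam: counts[v + i] = counts.get(v + i, 0) + 1'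
def updateB (counts : PySem.Dict Int Int) (ulam : List Int) (i : Int) : PySem.Dict Int Int :=
  ulam.foldl (fun d v => d.insert (v + i) (d.getD (v + i) 0 + 1)) counts

-- 'while len(ulam) < n' loop of B (same fuel totality guard)
def loopB (n : Int) (ulam : List Int) (counts : PySem.Dict Int Int) (i : Int) : Nat → List Int
  | 0 => ulam
  | fuel + 1 =>
    if (ulam.length : Int) < n then
      if counts.getD i 0 == 1 then
        loopB n (ulam ++ [i]) (updateB counts ulam i) (i + 1) fuel
      else
        loopB n ulam counts (i + 1) fuel
    else ulam

def numbers_Ulam_alt (n : Int) : List Int :=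
  if n == 1 then [1]
  else loopB n [1, 2] (PySem.Dict.empty.insert 3 1) 3 (64 * n.toNat + 64)

-- ===== PRECONDITION & SPEC =====
def Spec_numbers_Ulam (n : Int) (out : List Int) : Prop := out = numbers_Ulam_alt n
instance (n : Int) (out : List Int) : Decidable (Spec_numbers_Ulam n out) := by unfold Spec_numbers_Ulam; infer_instance

-- ===== CLAIM (what is proved, stated in full; the proofs are below) =====
def Claim_equal_numbers_Ulam : Prop := ∀ (n : Int), Dom_numbers_Ulam n → Spec_numbers_Ulam n (numbers_Ulam n)

-- ===== LEMMAS AND PROOFS =====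

-- number of pairs (j < k) of positions of l with l[j] + l[k] = m
def pcount : List Int → Int → Nat
  | [], _ => 0
  | x :: xs, m => xs.countP (fun y => x + y == m) + pcount xs m

theorem innerA_eq (ulam : List Int) (i : Int) (j : Nat) :
    ∀ k count, count ≤ 1 →
      innerA ulam i j k count =
        min (count + (ulam.drop k).countP (fun y => ulam.getD j 0 + y == i)) 2 := by
  suffices H : ∀ d k count, ulam.length - k ≤ d → count ≤ 1 →
      innerA ulam i j k count =
        min (count + (ulam.drop k).countP (fun y => ulam.getD j 0 + y == i)) 2 by
    intro k count hc; exact H (ulam.length - k) k count le_rfl hc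
  intro d
  induction d with
  | zero =>
    intro k count hle hc
    have h : ¬ k < ulam.length := by omega
    rw [innerA]
    simp only [h, if_false, List.drop_eq_nil_of_le (by omega : ulam.length ≤ k),
      List.countP_nil]
    omega
  | succ d ih =>
    intro k count hle hc
    by_cases h : k < ulam.length
    · rw [innerA]
      simp only [h, if_true]
      rw [List.drop_eq_getElem_cons h, List.countP_cons,
        List.getD_eq_getElem ulam 0 h]
      by_cases hb : ulam.getD j 0 + ulam[k] == i
      · simp only [hb, if_true]
        by_cases h2 : 1 < count + 1
        · simp only [h2, if_true]
          have : (ulam.drop (k+1)).countP (fun y => ulam.getD j 0 + y == i) + 1 ≥ 1 := by omega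
          omega
        · simp only [h2, if_false]
          rw [ih (k+1) (count+1) (by omega) (by omega)]
          omega
      · simp only [hb, Bool.false_eq_true, if_false]
        have h2 : ¬ 1 < count := by omega
        simp only [h2, if_false]
        rw [ih (k+1) count (by omega) hc]
        omega
    · rw [innerA]
      simp only [h, if_false, List.drop_eq_nil_of_le (by omega : ulam.length ≤ k),
        List.countP_nil]
      omega

theorem pcount_short (l : List Int) (m : Int) (h : l.length ≤ 1) : pcount l m = 0 := by
  match l with
  | [] => rfl
  | [x] => simp [pcount]
  | x :: y :: _ => simp at h

theorem outerA_eq (ulam : List Int) (i : Int) :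
    ∀ j count, count ≤ 1 →
      outerA ulam i j count = min (count + pcount (ulam.drop j) i) 2 := by
  suffices H : ∀ d j count, ulam.length - j ≤ d → count ≤ 1 →
      outerA ulam i j count = min (count + pcount (ulam.drop j) i) 2 by
    intro j count hc; exact H (ulam.length - j) j count le_rfl hc
  intro d
  induction d with
  | zero =>
    intro j count hle hc
    have h : ¬ j + 1 < ulam.length := by omega
    rw [outerA]
    simp only [h, if_false]
    rw [pcount_short _ _ (by simp [List.length_drop]; omega)]
    omega
  | succ d ih =>
    intro j count hle hc
    by_cases h : j + 1 < ulam.length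
    · have hj : j < ulam.length := by omega
      rw [outerA]
      simp only [h, if_true]
      rw [innerA_eq ulam i j (j+1) count hc,
        List.drop_eq_getElem_cons hj, List.getD_eq_getElem ulam 0 hj]
      simp only [pcount]
      by_cases h2 : 1 < min (count + (ulam.drop (j+1)).countP (fun y => ulam[j] + y == i)) 2
      · simp only [h2, if_true]
        omega
      · simp only [h2, if_false]
        rw [ih (j+1) _ (by omega) (by omega)]
        omega
    · rw [outerA]
      simp only [h, if_false]
      rw [pcount_short _ _ (by simp [List.length_drop]; omega)]
      omega

theorem pcount_append (l : List Int) (x m : Int) :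
    pcount (l ++ [x]) m = pcount l m + l.countP (fun v => v + x == m) := by
  induction l with
  | nil => simp [pcount]
  | cons a l ih =>
    simp only [List.cons_append, pcount, List.countP_append, List.countP_cons, ih,
      List.countP_nil]
    omega

theorem updateB_getD (counts : PySem.Dict Int Int) (ulam : List Int) (i m : Int) :
    (updateB counts ulam i).getD m 0 =
      counts.getD m 0 + (ulam.countP (fun v => v + i == m) : Int) := by
  unfold updateB
  induction ulam generalizing counts with
  | nil => simp
  | cons a l ih =>
    simp only [List.foldl_cons, List.countP_cons]
    rw [ih, PySem.Dict.getD_insert]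
    by_cases hm : m = a + i
    · simp only [hm, if_true, beq_self_eq_true]
      push_cast
      ring
    · have hb : (a + i == m) = false := by
        simp only [beq_eq_false_iff_ne, ne_eq]
        omega
      simp only [hm, if_false, hb]
      push_cast
      ring

theorem loop_eq (n : Int) :
    ∀ fuel ulam counts i,
      (∀ m, PySem.Dict.getD counts m 0 = (pcount ulam m : Int)) →
      loopA n ulam i fuel = loopB n ulam counts i fuel := by
  intro fuel
  induction fuel with
  | zero => intro ulam counts i _; rfl
  | succ fuel ih =>
    intro ulam counts i hinv
    rw [loopA, loopB]
    by_cases hlen : (ulam.length : Int) < n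
    · simp only [hlen, if_true]
      have hA : outerA ulam i 0 0 = min (pcount ulam i) 2 := by
        rw [outerA_eq ulam i 0 0 (by omega)]; simp
      by_cases hcase : pcount ulam i = 1
      · have e1 : (outerA ulam i 0 0 == 1) = true := by
          rw [hA, hcase]; rfl
        have e2 : (PySem.Dict.getD counts i 0 == 1) = true := by
          rw [hinv i, hcase]; rfl
        simp only [e1, e2, if_true]
        exact ih (ulam ++ [i]) (updateB counts ulam i) (i + 1) (fun m => by
          rw [updateB_getD, hinv m, pcount_append]; push_cast; ring)
      · have e1 : (outerA ulam i 0 0 == 1) = false := by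
          rw [hA]; simp; omega
        have e2 : (PySem.Dict.getD counts i 0 == 1) = false := by
          rw [hinv i]; simp; exact_mod_cast hcase
        simp only [e1, e2, Bool.false_eq_true, if_false]
        exact ih ulam counts (i + 1) hinv
    · simp only [hlen, if_false]

-- ===== VERDICT (by name: the statement is the Claim_ definition above) =====
theorem numbers_Ulam_spec : Claim_equal_numbers_Ulam := by
  intro n _
  unfold Spec_numbers_Ulam numbers_Ulam numbers_Ulam_alt
  split
  · rfl
  · apply loop_eq
    intro m
    by_cases hm : m = 3
    · subst hm
      simp [pcount]
    · rw [PySem.Dict.getD_insert]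
      simp only [hm, if_false]
      rw [PySem.Dict.getD_empty]
      simp [pcount]
      omega
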